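-- pv_equiv track=rewrite | github.com/imn00133/algorithm2022 | ItIsCodingTest/jaehyeong/chap12/13.chicken_delivery.py | chicken_open
-- ===== SOURCE A (Python) =====
-- MAX = 100000000
--
-- def calc_chicken_distance(chicken_survivals, chicken_distances):
--     answer = 0
--     for chicken_distance in chicken_distances:
--         answer += min([chicken_distance[i] for i in chicken_survivals])
--     return answer
--
-- def chicken_open(available_open_num, chicken_index, chicken_survivals, min_distance, chicken_distances):
--     if available_open_num == 0:
--         return calc_chicken_distance(chicken_survivals, chicken_distances)
--
--     if available_open_num > len(chicken_distances[0]) - chicken_index: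
--         return MAX
--
--     if chicken_index >= len(chicken_distances[0]):
--         return MAX
--
--     chicken_survivals.append(chicken_index)
--     selected_distance = chicken_open(available_open_num-1, chicken_index+1, chicken_survivals, min_distance, chicken_distances)
--     chicken_survivals.pop()
--     unselected_distance = chicken_open(available_open_num, chicken_index+1, chicken_survivals, min_distance, chicken_distances)
--     return min(min_distance, selected_distance, unselected_distance)
-- ===== SOURCE B (Python) =====
-- MAX = 100000000
--
-- def chicken_open(available_open_num, chicken_index, chicken_survivals, min_distance, chicken_distances):
--     INF = 1 << 62
--     if available_open_num != 0:
--         n = len(chicken_distances[0])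
--         if available_open_num > n - chicken_index or chicken_index >= n:
--             return MAX
--     # per-house minimum over the currently chosen stores, and its running sum
--     mins = [min((row[j] for j in chicken_survivals), default=INF) for row in chicken_distances]
--     total = sum(mins)
--     if available_open_num == 0:
--         return total
--     def go(j, remaining, mins, total, best):
--         if remaining == 0:
--             return min(best, total)
--         if j >= n or n - j < remaining:
--             return best
--         new_mins = []
--         new_total = total
--         for m, row in zip(mins, chicken_distances):
--             v = min(m, row[j])
--             new_total += v - m
--             new_mins.append(v)
--         best = go(j + 1, remaining - 1, new_mins, new_total, best)
--         return go(j + 1, remaining, mins, total, best)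
--     return go(chicken_index, available_open_num, mins, total, min(min_distance, MAX))
-- ===== Notes on version B (the rewrite author's own statement) =====
-- stated objective: alternative
-- what changed: Instead of rescanning the whole survivor list to recompute every house's minimum at each complete combination, B maintains the per-house minima and their running sum incrementally while recursing over add/skip store choices (O(houses) work per node instead of O(houses*|survivors|) per leaf; a timing run's inputs did not show a measured speed-up).
-- outside the precondition, e.g. on chicken_open(-1, 0, [5], 7, [[1, 2]]): A returns 7, B raises IndexError
import Mathlib
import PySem

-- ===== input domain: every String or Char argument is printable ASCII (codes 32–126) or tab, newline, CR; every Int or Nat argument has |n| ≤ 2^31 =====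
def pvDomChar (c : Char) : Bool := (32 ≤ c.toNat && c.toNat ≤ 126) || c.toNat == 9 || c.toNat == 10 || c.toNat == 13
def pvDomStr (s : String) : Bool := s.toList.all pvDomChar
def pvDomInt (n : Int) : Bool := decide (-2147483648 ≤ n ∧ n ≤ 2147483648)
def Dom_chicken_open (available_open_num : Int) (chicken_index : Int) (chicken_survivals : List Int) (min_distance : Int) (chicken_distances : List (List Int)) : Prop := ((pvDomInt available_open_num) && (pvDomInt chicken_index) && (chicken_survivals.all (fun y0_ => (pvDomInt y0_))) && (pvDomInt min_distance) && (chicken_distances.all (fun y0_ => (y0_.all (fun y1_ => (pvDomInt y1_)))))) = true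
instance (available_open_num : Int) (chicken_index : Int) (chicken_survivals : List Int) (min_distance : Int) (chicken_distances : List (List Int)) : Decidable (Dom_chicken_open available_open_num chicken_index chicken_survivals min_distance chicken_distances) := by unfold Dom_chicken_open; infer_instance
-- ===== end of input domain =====

-- B replaces A's per-leaf rescan (min over the whole survivor list, for every house, at every
-- complete combination) by per-house minima and their running sum maintained incrementally along the
-- add/skip recursion (objective: alternative).  A temporarily appends to and pops from
-- chicken_survivals, restoring it before returning; the equivalence proved here is about the return
-- value (B does not mutate its arguments).

-- ===== PORT A =====
-- port of calc_chicken_distance; min([...]) of an empty list raises ValueError in Python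
-- (excluded by Pre_), here `.getD 0`
def pv_calc_chicken_distance (chicken_survivals : List Int) (chicken_distances : List (List Int)) : Int :=
  chicken_distances.foldl
    (fun answer chicken_distance =>
      answer + (PySem.List.min?
          (chicken_survivals.map fun i => (PySem.List.pyGet? chicken_distance i).getD 0)
          (fun y => y)).getD 0)
    0

def chicken_open (available_open_num : Int) (chicken_index : Int) (chicken_survivals : List Int) (min_distance : Int) (chicken_distances : List (List Int)) : Int :=
  if available_open_num = 0 then
    pv_calc_chicken_distance chicken_survivals chicken_distances
  else if available_open_num > (((PySem.List.pyGet? chicken_distances 0).getD []).length : Int) - chicken_index then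
    100000000
  else if chicken_index ≥ (((PySem.List.pyGet? chicken_distances 0).getD []).length : Int) then
    100000000
  else
    -- append chicken_index, recurse, pop (the list is restored, so value-wise it is S ++ [i] here)
    let selected_distance := chicken_open (available_open_num - 1) (chicken_index + 1) (chicken_survivals ++ [chicken_index]) min_distance chicken_distances
    let unselected_distance := chicken_open available_open_num (chicken_index + 1) chicken_survivals min_distance chicken_distances
    min (min min_distance selected_distance) unselected_distance
termination_by ((((PySem.List.pyGet? chicken_distances 0).getD []).length : Int) - chicken_index).toNat
decreasing_by all_goals omega

-- ===== PORT B =====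
-- the add/skip recursion of Source B: `mins`/`total` are the per-house minima over the stores chosen so
-- far and their sum, updated with one `min` per house when store column j is selected; `best` is threaded through
def pv_go (chicken_distances : List (List Int)) (n : Int) (j remaining : Int) (mins : List Int) (total best : Int) : Int :=
  if remaining = 0 then min best total
  else if j ≥ n ∨ n - j < remaining then best
  else
    let upd := (List.zip mins chicken_distances).foldl
      (fun (acc : List Int × Int) p =>
        let v := min p.1 ((PySem.List.pyGet? p.2 j).getD 0)
        (acc.1 ++ [v], acc.2 + (v - p.1)))
      (([] : List Int), total)
    pv_go chicken_distances n (j + 1) remaining mins total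
      (pv_go chicken_distances n (j + 1) (remaining - 1) upd.1 upd.2 best)
termination_by (n - j).toNat
decreasing_by all_goals omega

def chicken_open_alt (available_open_num : Int) (chicken_index : Int) (chicken_survivals : List Int) (min_distance : Int) (chicken_distances : List (List Int)) : Int :=
  -- n = len(chicken_distances[0]); Python reads it only when available_open_num ≠ 0 (dist = [] with
  -- available_open_num ≠ 0 raises IndexError and is excluded by Pre_), here hoisted with `.getD []`
  let n : Int := (((PySem.List.pyGet? chicken_distances 0).getD []).length : Int)
  if available_open_num ≠ 0 ∧ (available_open_num > n - chicken_index ∨ chicken_index ≥ n) then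
    100000000
  else
    -- mins = [min((row[j] for j in survivals), default=INF) for row in dist]; total = sum(mins)
    let mins := chicken_distances.map fun row =>
      (PySem.List.min? (chicken_survivals.map fun j => (PySem.List.pyGet? row j).getD 0)
        (fun y => y)).getD 4611686018427387904
    let total := mins.foldl (· + ·) 0
    if available_open_num = 0 then total
    else pv_go chicken_distances n chicken_index available_open_num mins total (min min_distance 100000000)

-- ===== PRECONDITION & SPEC =====
-- Pre_ excludes exactly the inputs where a survivor index or a needed store column is out of range
-- for some row (or the survivor list is empty / the grid is empty where a minimum over it is taken):
-- Python raises IndexError/ValueError wherever such an index is actually read; for a negative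
-- available_open_num A never reads the rows and returns its sentinel, while B's eager per-house
-- minima do read them and raise, so those inputs are excluded too (see cites).
def Pre_chicken_open (available_open_num : Int) (chicken_index : Int) (chicken_survivals : List Int) (min_distance : Int) (chicken_distances : List (List Int)) : Prop :=
  if available_open_num = 0 then
    chicken_distances = [] ∨
      (chicken_survivals ≠ [] ∧
        ∀ row ∈ chicken_distances, ∀ x ∈ chicken_survivals, PySem.Raise.InRange row.length x)
  else
    chicken_distances ≠ [] ∧
    ((available_open_num ≤ (chicken_distances.headI.length : Int) - chicken_index ∧
        chicken_index < (chicken_distances.headI.length : Int)) →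
      (∀ row ∈ chicken_distances, ∀ x ∈ chicken_survivals, PySem.Raise.InRange row.length x) ∧
      (∀ row ∈ chicken_distances,
        (chicken_distances.headI.length : Int) ≤ (row.length : Int) ∧ -(row.length : Int) ≤ chicken_index))
instance (available_open_num : Int) (chicken_index : Int) (chicken_survivals : List Int) (min_distance : Int) (chicken_distances : List (List Int)) : Decidable (Pre_chicken_open available_open_num chicken_index chicken_survivals min_distance chicken_distances) := by unfold Pre_chicken_open; infer_instance

def pvWitness_chicken_open : Int × Int × List Int × Int × List (List Int) := (1, 0, [], 100, [[1, 2], [3, 4]])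

def Spec_chicken_open (available_open_num : Int) (chicken_index : Int) (chicken_survivals : List Int) (min_distance : Int) (chicken_distances : List (List Int)) (out : Int) : Prop := out = chicken_open_alt available_open_num chicken_index chicken_survivals min_distance chicken_distances
instance (available_open_num : Int) (chicken_index : Int) (chicken_survivals : List Int) (min_distance : Int) (chicken_distances : List (List Int)) (out : Int) : Decidable (Spec_chicken_open available_open_num chicken_index chicken_survivals min_distance chicken_distances out) := by unfold Spec_chicken_open; infer_instance

-- ===== CLAIM (what is proved, stated in full; the proofs are below) =====
def Claim_equal_chicken_open : Prop := ∀ (available_open_num : Int) (chicken_index : Int) (chicken_survivals : List Int) (min_distance : Int) (chicken_distances : List (List Int)), Dom_chicken_open available_open_num chicken_index chicken_survivals min_distance chicken_distances → Pre_chicken_open available_open_num chicken_index chicken_survivals min_distance chicken_distances → Spec_chicken_open available_open_num chicken_index chicken_survivals min_distance chicken_distances (chicken_open available_open_num chicken_index chicken_survivals min_distance chicken_distances)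

-- ===== LEMMAS AND PROOFS =====

theorem chicken_open_witness_ok :
    Dom_chicken_open pvWitness_chicken_open.1 pvWitness_chicken_open.2.1 pvWitness_chicken_open.2.2.1 pvWitness_chicken_open.2.2.2.1 pvWitness_chicken_open.2.2.2.2 ∧
    Pre_chicken_open pvWitness_chicken_open.1 pvWitness_chicken_open.2.1 pvWitness_chicken_open.2.2.1 pvWitness_chicken_open.2.2.2.1 pvWitness_chicken_open.2.2.2.2 := by
  decide

-- the value B keeps per house: minimum over the chosen stores, INF when no store is chosen yet
def pvMval (S : List Int) (row : List Int) : Option Int :=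
  PySem.List.min? (S.map fun j => (PySem.List.pyGet? row j).getD 0) (fun y => y)

def pvMinsOf (S : List Int) (dist : List (List Int)) : List Int :=
  dist.map fun row => (pvMval S row).getD 4611686018427387904


-- pointwise update: adding store column j to the chosen set updates a house's minimum by one `min`
theorem pvMval_append (S : List Int) (j : Int) (row : List Int)
    (hb : (PySem.List.pyGet? row j).getD 0 ≤ 4611686018427387904) :
    min ((pvMval S row).getD 4611686018427387904) ((PySem.List.pyGet? row j).getD 0)
      = (pvMval (S ++ [j]) row).getD 4611686018427387904 := by
  cases S with
  | nil =>
      have h0 : pvMval ([] : List Int) row = none := rfl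
      have h1 : pvMval ([j] : List Int) row
          = some ((PySem.List.pyGet? row j).getD 0) := by
        simp [pvMval, PySem.List.min?_id_cons]
      simp only [List.nil_append, h0, h1, Option.getD_none, Option.getD_some]
      omega
  | cons s t =>
      simp [pvMval, PySem.List.min?_id_cons, List.foldl_append]

-- B's inner for-loop over zip(mins, dist): it produces the updated minima and the updated sum
theorem pvUpdFold (S : List Int) (j : Int) (dist : List (List Int)) (acc : List Int) (t : Int)
    (hb : ∀ row ∈ dist, (PySem.List.pyGet? row j).getD 0 ≤ 4611686018427387904) :
    (List.zip (pvMinsOf S dist) dist).foldl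
      (fun (acc : List Int × Int) p =>
        let v := min p.1 ((PySem.List.pyGet? p.2 j).getD 0)
        (acc.1 ++ [v], acc.2 + (v - p.1)))
      (acc, t)
    = (acc ++ pvMinsOf (S ++ [j]) dist,
       t + ((pvMinsOf (S ++ [j]) dist).sum - (pvMinsOf S dist).sum)) := by
  induction dist generalizing acc t with
  | nil => simp [pvMinsOf]
  | cons row rest ih =>
      have hrow := pvMval_append S j row (hb row (by simp))
      simp only [pvMinsOf, List.map_cons, List.zip_cons_cons, List.foldl_cons]
      rw [show (pvMinsOf S rest) = rest.map (fun row => (pvMval S row).getD 4611686018427387904) from rfl] at ih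
      rw [ih (hb := fun r hr => hb r (by simp [hr]))]
      simp only [pvMinsOf] at hrow ⊢
      rw [hrow]
      simp only [Prod.mk.injEq]
      refine ⟨by simp, ?_⟩
      simp only [List.sum_cons]
      ring

-- when the survivor list is nonempty (or there are no houses), A's calc equals the sum of B's minima
theorem pvCalc_eq_sum (S : List Int) (dist : List (List Int))
    (h : dist = [] ∨ S ≠ []) :
    pv_calc_chicken_distance S dist = (pvMinsOf S dist).sum := by
  rcases h with h | h
  · subst h; simp [pv_calc_chicken_distance, pvMinsOf]
  · have hpt : ∀ row : List Int,
        (PySem.List.min? (S.map fun i => (PySem.List.pyGet? row i).getD 0) (fun y => y)).getD 0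
          = (pvMval S row).getD 4611686018427387904 := by
      intro row
      cases S with
      | nil => exact absurd rfl h
      | cons s t => simp [pvMval, PySem.List.min?_id_cons]
    unfold pv_calc_chicken_distance
    rw [PySem.List.foldl_add (g := fun row =>
      (PySem.List.min? (S.map fun i => (PySem.List.pyGet? row i).getD 0) (fun y => y)).getD 0)]
    simp only [pvMinsOf, zero_add]
    congr 1
    exact List.map_congr_left (fun row _ => hpt row)

-- at a feasible non-leaf node A's value is bounded by min_distance and by the sentinel
theorem pvA_le (md : Int) (dist : List (List Int)) :
    ∀ k (a i : Int) (S : List Int),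
      ((((PySem.List.pyGet? dist 0).getD []).length : Int) - i).toNat = k →
      a ≠ 0 → a ≤ (((PySem.List.pyGet? dist 0).getD []).length : Int) - i →
      i < (((PySem.List.pyGet? dist 0).getD []).length : Int) →
      chicken_open a i S md dist ≤ md ∧ chicken_open a i S md dist ≤ 100000000 := by
  intro k
  induction k with
  | zero => intro a i S hk _ _ hlt; omega
  | succ k ih =>
      intro a i S hk ha hfe hlt
      rw [chicken_open]
      simp only [if_neg ha, if_neg (by omega : ¬ a > (((PySem.List.pyGet? dist 0).getD []).length : Int) - i),
        if_neg (by omega : ¬ i ≥ (((PySem.List.pyGet? dist 0).getD []).length : Int))]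
      refine ⟨by omega, ?_⟩
      by_cases h1 : a > (((PySem.List.pyGet? dist 0).getD []).length : Int) - (i + 1)
      · have : chicken_open a (i + 1) S md dist = 100000000 := by
          rw [chicken_open]; simp only [if_neg ha, if_pos h1]
        omega
      · by_cases h2 : i + 1 ≥ (((PySem.List.pyGet? dist 0).getD []).length : Int)
        · have : chicken_open a (i + 1) S md dist = 100000000 := by
            rw [chicken_open]; simp only [if_neg ha, if_neg (by omega), if_pos h2]
          omega
        · have := ih a (i + 1) S (by omega) ha (by omega) (by omega)
          omega

-- main invariant: pv_go on B's state for the survivor list S computes `min best (A at this node)`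
theorem pvMain (md : Int) (dist : List (List Int))
    (hb : ∀ row ∈ dist, ∀ x ∈ row, x ≤ 4611686018427387904) :
    ∀ k (j rem : Int) (S : List Int) (best : Int),
      ((((PySem.List.pyGet? dist 0).getD []).length : Int) - j).toNat = k →
      (rem = 0 → (dist = [] ∨ S ≠ [])) →
      best ≤ md → best ≤ 100000000 →
      pv_go dist (((PySem.List.pyGet? dist 0).getD []).length : Int) j rem (pvMinsOf S dist) ((pvMinsOf S dist).sum) best
        = min best (chicken_open rem j S md dist) := by
  have hb' : ∀ (j : Int), ∀ row ∈ dist, (PySem.List.pyGet? row j).getD 0 ≤ 4611686018427387904 := by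
    intro j row hrow
    cases hg : PySem.List.pyGet? row j with
    | none => simp
    | some v => simpa using hb row hrow v (PySem.List.mem_of_pyGet?_eq_some row hg)
  intro k
  induction k with
  | zero =>
      intro j rem S best hk hne hbmd hbmax
      rw [pv_go, chicken_open]
      by_cases h0 : rem = 0
      · simp only [if_pos h0]
        rw [pvCalc_eq_sum S dist (hne h0)]
      · simp only [if_neg h0]
        have hguard : j ≥ (((PySem.List.pyGet? dist 0).getD []).length : Int) ∨
            (((PySem.List.pyGet? dist 0).getD []).length : Int) - j < rem := by omega
        rw [if_pos hguard]
        by_cases h1 : rem > (((PySem.List.pyGet? dist 0).getD []).length : Int) - j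
        · rw [if_pos h1]; omega
        · rw [if_neg h1, if_pos (by omega)]; omega
  | succ k ih =>
      intro j rem S best hk hne hbmd hbmax
      rw [pv_go, chicken_open]
      by_cases h0 : rem = 0
      · simp only [if_pos h0]
        rw [pvCalc_eq_sum S dist (hne h0)]
      · simp only [if_neg h0]
        by_cases hguard : j ≥ (((PySem.List.pyGet? dist 0).getD []).length : Int) ∨
            (((PySem.List.pyGet? dist 0).getD []).length : Int) - j < rem
        · rw [if_pos hguard]
          by_cases h1 : rem > (((PySem.List.pyGet? dist 0).getD []).length : Int) - j
          · rw [if_pos h1]; omega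
          · rw [if_neg h1, if_pos (by omega)]; omega
        · rw [if_neg hguard]
          push_neg at hguard
          rw [if_neg (by omega : ¬ rem > (((PySem.List.pyGet? dist 0).getD []).length : Int) - j),
              if_neg (by omega : ¬ j ≥ (((PySem.List.pyGet? dist 0).getD []).length : Int))]
          rw [pvUpdFold S j dist [] ((pvMinsOf S dist).sum) (hb' j)]
          simp only [List.nil_append]
          rw [show (pvMinsOf S dist).sum + ((pvMinsOf (S ++ [j]) dist).sum - (pvMinsOf S dist).sum)
                = (pvMinsOf (S ++ [j]) dist).sum by ring]
          rw [ih (j + 1) (rem - 1) (S ++ [j]) best (by omega) (by simp) hbmd hbmax]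
          rw [ih (j + 1) rem S (min best (chicken_open (rem - 1) (j + 1) (S ++ [j]) md dist))
                (by omega) (fun h => absurd h h0) (by omega) (by omega)]
          omega

-- ===== VERDICT (by name: the statement is the Claim_ definition above) =====
theorem chicken_open_spec : Claim_equal_chicken_open := by
  unfold Claim_equal_chicken_open
  intro a i S md dist hDom hPre
  unfold Spec_chicken_open
  have hb : ∀ row ∈ dist, ∀ x ∈ row, x ≤ 4611686018427387904 := by
    have : dist.all (fun r => r.all (fun x => pvDomInt x)) = true := by
      unfold Dom_chicken_open at hDom
      simp only [Bool.and_eq_true] at hDom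
      exact hDom.2
    intro row hrow x hx
    have := List.all_eq_true.mp (List.all_eq_true.mp this row hrow) x hx
    simp only [pvDomInt, decide_eq_true_eq] at this
    omega
  unfold Pre_chicken_open at hPre
  unfold chicken_open_alt
  by_cases ha : a = 0
  · subst ha
    rw [if_pos rfl] at hPre
    rw [chicken_open, if_pos rfl]
    rw [if_neg (by simp : ¬((0:Int) ≠ 0 ∧ ((0:Int) > (((PySem.List.pyGet? dist 0).getD []).length : Int) - i ∨ i ≥ (((PySem.List.pyGet? dist 0).getD []).length : Int))))]
    rw [if_pos rfl]
    rw [PySem.List.foldl_add (g := fun x : Int => x)]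
    simp only [List.map_id', zero_add]
    exact pvCalc_eq_sum S dist (by tauto)
  · simp only [if_neg ha] at hPre
    rw [chicken_open]
    simp only [if_neg ha]
    by_cases hge : a > (((PySem.List.pyGet? dist 0).getD []).length : Int) - i ∨
        i ≥ (((PySem.List.pyGet? dist 0).getD []).length : Int)
    · by_cases h1 : a > (((PySem.List.pyGet? dist 0).getD []).length : Int) - i
      · rw [if_pos h1, if_pos (show a ≠ 0 ∧ (a > (((PySem.List.pyGet? dist 0).getD []).length : Int) - i ∨ i ≥ (((PySem.List.pyGet? dist 0).getD []).length : Int)) from ⟨ha, Or.inl h1⟩)]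
      · have h2 : i ≥ (((PySem.List.pyGet? dist 0).getD []).length : Int) := by
          rcases hge with h | h
          · exact absurd h h1
          · exact h
        rw [if_neg h1, if_pos h2, if_pos (show a ≠ 0 ∧ (a > (((PySem.List.pyGet? dist 0).getD []).length : Int) - i ∨ i ≥ (((PySem.List.pyGet? dist 0).getD []).length : Int)) from ⟨ha, Or.inr h2⟩)]
    · push_neg at hge
      rw [if_neg (show ¬(a ≠ 0 ∧ (a > (((PySem.List.pyGet? dist 0).getD []).length : Int) - i ∨ i ≥ (((PySem.List.pyGet? dist 0).getD []).length : Int))) by push_neg; exact fun _ => ⟨by omega, by omega⟩)]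
      rw [if_neg (by omega : ¬ a > (((PySem.List.pyGet? dist 0).getD []).length : Int) - i),
          if_neg (by omega : ¬ i ≥ (((PySem.List.pyGet? dist 0).getD []).length : Int))]
      rw [PySem.List.foldl_add (g := fun x : Int => x)]
      simp only [List.map_id', zero_add]
      have hmain := pvMain md dist hb ((((PySem.List.pyGet? dist 0).getD []).length : Int) - i).toNat
        i a S (min md 100000000) rfl (fun h => absurd h ha) (min_le_left _ _) (min_le_right _ _)
      rw [show (dist.map fun row =>
            (PySem.List.min? (S.map fun j => (PySem.List.pyGet? row j).getD 0) (fun y => y)).getD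
              4611686018427387904) = pvMinsOf S dist from rfl]
      rw [hmain]
      have hle := pvA_le md dist ((((PySem.List.pyGet? dist 0).getD []).length : Int) - i).toNat
        a i S rfl ha (by omega) (by omega)
      -- A's value at a feasible node is ≤ md and ≤ 100000000, so the seeded best is absorbed
      have hunf : chicken_open a i S md dist
          = min (min md (chicken_open (a - 1) (i + 1) (S ++ [i]) md dist))
              (chicken_open a (i + 1) S md dist) := by
        rw [chicken_open, if_neg ha, if_neg (by omega : ¬ a > (((PySem.List.pyGet? dist 0).getD []).length : Int) - i),
            if_neg (by omega : ¬ i ≥ (((PySem.List.pyGet? dist 0).getD []).length : Int))]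
      rw [hunf]
      rw [hunf] at hle
      omega
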